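-- pv_equiv track=rewrite | github.com/vosslab/protein-image-grader | protein_image_grader/duplicate_processing.py | get_non_overlapping_group_sets
-- ===== SOURCE A (Python) =====
-- from collections import defaultdict
--
-- def dfs(node, graph, visited, component):
-- 	"""Recursive DFS to collect all connected nodes."""
-- 	visited.add(node)
-- 	component.add(node)
-- 	for neighbor in graph[node]:
-- 		if neighbor not in visited:
-- 			dfs(neighbor, graph, visited, component)
--
-- def get_non_overlapping_group_sets(list_of_sets):
-- 	"""Builds a graph and finds connected components to get non-overlapping groups."""
-- 	# Step 1: Build the adjacency list (graph)
-- 	graph = defaultdict(set)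
-- 	for group_set in list_of_sets:
-- 		for file1 in group_set:
-- 			for file2 in group_set:
-- 				if file1 != file2:
-- 					graph[file1].add(file2)
-- 					graph[file2].add(file1)
--
-- 	# Step 2: Find connected components using DFS
-- 	visited = set()
-- 	non_overlapping_group_sets = []
--
-- 	for node in graph:
-- 		if node not in visited:
-- 			component = set()
-- 			dfs(node, graph, visited, component)
-- 			non_overlapping_group_sets.append(component)
--
-- 	return non_overlapping_group_sets
-- ===== SOURCE B (Python) =====
-- def get_non_overlapping_group_sets(list_of_sets):
-- 	"""Groups overlapping sets into connected components: adjacency built from each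
-- 	unordered pair once (triangular enumeration, plain dict.setdefault), components
-- 	collected by an iterative stack-based DFS instead of recursion."""
-- 	graph = {}
-- 	for group_set in list_of_sets:
-- 		members = list(group_set)
-- 		for i, file1 in enumerate(members):
-- 			for file2 in members[i + 1:]:
-- 				if file1 != file2:
-- 					graph.setdefault(file1, set()).add(file2)
-- 					graph.setdefault(file2, set()).add(file1)
--
-- 	visited = set()
-- 	groups = []
-- 	for start in graph:
-- 		if start in visited:
-- 			continue
-- 		component = set()
-- 		stack = [start]
-- 		while stack:
-- 			node = stack.pop()
-- 			if node in visited: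
-- 				continue
-- 			visited.add(node)
-- 			component.add(node)
-- 			stack.extend(graph[node])
-- 		groups.append(component)
-- 	return groups
-- ===== Notes on version B (the rewrite author's own statement) =====
-- stated objective: alternative
-- what changed: B builds the adjacency map by enumerating each unordered pair once (triangular enumerate/slice loop with dict.setdefault instead of A's full ordered-pair double loop over a defaultdict) and collects each connected component with an iterative stack-based DFS instead of A's recursive DFS.
import Mathlib
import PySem

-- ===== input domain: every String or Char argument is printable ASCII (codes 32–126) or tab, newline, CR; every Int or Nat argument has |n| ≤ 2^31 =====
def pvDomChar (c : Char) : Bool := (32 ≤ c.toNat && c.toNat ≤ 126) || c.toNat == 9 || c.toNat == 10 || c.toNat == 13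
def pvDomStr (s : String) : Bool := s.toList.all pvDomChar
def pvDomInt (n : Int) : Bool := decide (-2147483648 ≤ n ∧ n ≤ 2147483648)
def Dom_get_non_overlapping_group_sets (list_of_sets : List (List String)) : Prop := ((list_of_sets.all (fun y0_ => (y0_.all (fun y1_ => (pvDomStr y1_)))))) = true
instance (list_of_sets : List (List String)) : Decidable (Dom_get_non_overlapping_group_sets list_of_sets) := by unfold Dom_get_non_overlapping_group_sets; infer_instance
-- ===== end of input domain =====

-- B replaces A's full quadratic pair enumeration by a triangular one (each unordered pair
-- visited once) and A's recursive DFS by an iterative stack DFS (objective: alternative;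
-- same asymptotic cost, about half the pair iterations and no recursion).
-- The equivalence proved is about the RETURN value; Python `set` values are modelled as
-- insertion-ordered duplicate-free lists (PySem.Set), whose iteration order Python does not fix.

-- ===== PORT A =====
-- `graph[x].add(y)` on a defaultdict(set): creates the key (appended at the end) if absent.
def pvAdd1 (g : PySem.Dict String (PySem.Set String)) (x y : String) : PySem.Dict String (PySem.Set String) :=
  g.insert x (PySem.Set.add (g.getD x PySem.Set.empty) y)

-- `graph[file1].add(file2); graph[file2].add(file1)`
def pvAddEdge (g : PySem.Dict String (PySem.Set String)) (x y : String) : PySem.Dict String (PySem.Set String) :=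
  pvAdd1 (pvAdd1 g x y) y x

-- the two inner `for file1 in group_set: for file2 in group_set:` loops of A
def pvCliqueA (s : List String) (g : PySem.Dict String (PySem.Set String)) : PySem.Dict String (PySem.Set String) :=
  s.foldl (fun g x => s.foldl (fun g y => if x = y then g else pvAddEdge g x y) g) g

def pvBuildGraphA (list_of_sets : List (List String)) : PySem.Dict String (PySem.Set String) :=
  list_of_sets.foldl (fun g s => pvCliqueA s g) PySem.Dict.empty

-- recursive `dfs(node, graph, visited, component)`; fuel only makes the recursion
-- structural (the caller passes fuel > number of keys, which is never exhausted)
def pvDfsA (g : PySem.Dict String (PySem.Set String)) :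
    Nat → String → PySem.Set String → PySem.Set String → PySem.Set String × PySem.Set String
  | 0, _, vis, comp => (vis, comp)
  | fuel+1, node, vis, comp =>
      (g.getD node PySem.Set.empty).foldl
        (fun p nb => if nb ∈ p.1 then p else pvDfsA g fuel nb p.1 p.2)
        (PySem.Set.add vis node, PySem.Set.add comp node)

def get_non_overlapping_group_sets (list_of_sets : List (List String)) : List (List String) :=
  let graph := pvBuildGraphA list_of_sets
  let fuel := graph.size + 1
  (graph.keys.foldl
    (fun (acc : List (List String) × PySem.Set String) node =>
      if node ∈ acc.2 then acc
      else
        let p := pvDfsA graph fuel node acc.2 PySem.Set.empty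
        (acc.1 ++ [p.2], p.1))
    ([], PySem.Set.empty)).1

-- ===== PORT B =====
-- `graph.setdefault(x, set()).add(y)`
def pvAdd1B (g : PySem.Dict String (PySem.Set String)) (x y : String) : PySem.Dict String (PySem.Set String) :=
  (g.setdefault x PySem.Set.empty).insert x
    (PySem.Set.add ((g.setdefault x PySem.Set.empty).getD x PySem.Set.empty) y)

def pvAddEdgeB (g : PySem.Dict String (PySem.Set String)) (x y : String) : PySem.Dict String (PySem.Set String) :=
  pvAdd1B (pvAdd1B g x y) y x

-- `for i, file1 in enumerate(group_set): for file2 in group_set[i+1:]:`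
def pvCliqueB (s : List String) (g : PySem.Dict String (PySem.Set String)) : PySem.Dict String (PySem.Set String) :=
  (PySem.List.enumerate s 0).foldl
    (fun g p => (PySem.List.slice s (some (p.1 + 1)) none).foldl
        (fun g y => if p.2 = y then g else pvAddEdgeB g p.2 y) g) g

def pvBuildGraphB (list_of_sets : List (List String)) : PySem.Dict String (PySem.Set String) :=
  list_of_sets.foldl (fun g s => pvCliqueB s g) PySem.Dict.empty

-- measure for the stack loop: keys not yet visited
def pvUnseen (g : PySem.Dict String (PySem.Set String)) (vis : PySem.Set String) : Nat :=
  g.keys.countP (fun k => decide (¬ k ∈ vis))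

theorem pvUnseen_add_lt (g : PySem.Dict String (PySem.Set String)) (vis : PySem.Set String)
    (n : String) (hk : n ∈ g.keys) (hv : ¬ n ∈ vis) :
    pvUnseen g (PySem.Set.add vis n) < pvUnseen g vis := by
  obtain ⟨l1, l2, hl⟩ := List.append_of_mem hk
  unfold pvUnseen
  rw [hl]
  simp only [List.countP_append, List.countP_cons]
  have h1 : List.countP (fun k => decide (¬ k ∈ PySem.Set.add vis n)) l1 ≤
      List.countP (fun k => decide (¬ k ∈ vis)) l1 := by
    apply List.countP_mono_left; intro k _
    simp only [decide_eq_true_eq, PySem.Set.mem_add]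
    exact fun hc hkv => hc (Or.inl hkv)
  have h2 : List.countP (fun k => decide (¬ k ∈ PySem.Set.add vis n)) l2 ≤
      List.countP (fun k => decide (¬ k ∈ vis)) l2 := by
    apply List.countP_mono_left; intro k _
    simp only [decide_eq_true_eq, PySem.Set.mem_add]
    exact fun hc hkv => hc (Or.inl hkv)
  have hn1 : (decide (¬ n ∈ PySem.Set.add vis n) : Bool) = false := by
    simp [PySem.Set.mem_add]
  have hn2 : (decide (¬ n ∈ vis) : Bool) = true := by simpa using hv
  rw [hn1, hn2]
  simp only [Bool.false_eq_true, if_false, if_true]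
  omega

theorem pvUnseen_add_of_not_mem (g : PySem.Dict String (PySem.Set String)) (vis : PySem.Set String)
    (n : String) (hk : ¬ n ∈ g.keys) :
    pvUnseen g (PySem.Set.add vis n) = pvUnseen g vis := by
  apply List.countP_congr
  intro k hkk
  have hne : k ≠ n := fun he => hk (he ▸ hkk)
  simp only [decide_eq_true_eq, PySem.Set.mem_add]
  constructor
  · exact fun hc hkv => hc (Or.inl hkv)
  · rintro hc (hkv | rfl)
    · exact hc hkv
    · exact hne rfl

-- `while stack:` loop of B; the stack top is kept at the HEAD of the list (Python keeps it at
-- the end), so pushing the neighbour set becomes prepending it; a Python set's iteration order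
-- is not modelled, the components produced do not depend on it.
def pvRunStack (g : PySem.Dict String (PySem.Set String)) :
    List String → PySem.Set String → PySem.Set String → PySem.Set String × PySem.Set String
  | [], vis, comp => (vis, comp)
  | n :: st, vis, comp =>
      if h : n ∈ vis then pvRunStack g st vis comp
      else pvRunStack g (g.getD n PySem.Set.empty ++ st) (PySem.Set.add vis n) (PySem.Set.add comp n)
termination_by st vis _ => (pvUnseen g vis, st.length)
decreasing_by
  · exact Prod.Lex.right _ (by simp)
  · by_cases hk : n ∈ g.keys
    · exact Prod.Lex.left _ _ (pvUnseen_add_lt g vis n hk h)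
    · have hz : g.getD n PySem.Set.empty = [] := by
        apply PySem.Dict.getD_of_not_contains
        exact Bool.eq_false_iff.mpr (fun hc => hk ((PySem.Dict.contains_iff_mem_keys g n).mp hc))
      rw [pvUnseen_add_of_not_mem g vis n hk]
      exact Prod.Lex.right _ (by simp [PySem.Set.empty] at hz; simp [hz])

def get_non_overlapping_group_sets_alt (list_of_sets : List (List String)) : List (List String) :=
  let graph := pvBuildGraphB list_of_sets
  (graph.keys.foldl
    (fun (acc : List (List String) × PySem.Set String) start =>
      if start ∈ acc.2 then acc
      else
        let p := pvRunStack graph [start] acc.2 PySem.Set.empty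
        (acc.1 ++ [p.2], p.1))
    ([], PySem.Set.empty)).1

-- ===== PRECONDITION & SPEC =====
def Spec_get_non_overlapping_group_sets (list_of_sets : List (List String)) (out : List (List String)) : Prop := out = get_non_overlapping_group_sets_alt list_of_sets
instance (list_of_sets : List (List String)) (out : List (List String)) : Decidable (Spec_get_non_overlapping_group_sets list_of_sets out) := by unfold Spec_get_non_overlapping_group_sets; infer_instance

-- ===== CLAIM (what is proved, stated in full; the proofs are below) =====
def Claim_equal_get_non_overlapping_group_sets : Prop := ∀ (list_of_sets : List (List String)), Dom_get_non_overlapping_group_sets list_of_sets → Spec_get_non_overlapping_group_sets list_of_sets (get_non_overlapping_group_sets list_of_sets)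

-- ===== LEMMAS AND PROOFS =====

-- edge relation and the invariant of both builds
def pvHasEdge (g : PySem.Dict String (PySem.Set String)) (x y : String) : Prop :=
  y ∈ g.getD x PySem.Set.empty

def pvGood (g : PySem.Dict String (PySem.Set String)) : Prop :=
  g.keys.Nodup ∧ ∀ x y, pvHasEdge g x y → pvHasEdge g y x ∧ x ∈ g.keys ∧ y ∈ g.keys

def pvStep (g : PySem.Dict String (PySem.Set String)) (p : String × String) : PySem.Dict String (PySem.Set String) :=
  if p.1 = p.2 then g else pvAddEdge g p.1 p.2

-- triangular pair list
def pvPairsT : List String → List (String × String)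
  | [] => []
  | x :: t => t.map (fun y => (x, y)) ++ pvPairsT t

theorem pvPairsT_cons (x : String) (t : List String) :
    pvPairsT (x :: t) = t.map (fun y => (x, y)) ++ pvPairsT t := rfl

-- ---- Part 1: the two graph builds are equal ----

theorem pvUnseen_mono (g : PySem.Dict String (PySem.Set String)) (vis vis' : PySem.Set String)
    (h : ∀ a ∈ vis, a ∈ vis') : pvUnseen g vis' ≤ pvUnseen g vis := by
  apply List.countP_mono_left
  intro k _
  simp only [decide_eq_true_eq]
  exact fun hk hkv => hk (h k hkv)


theorem pvHasEdge_add1 (g : PySem.Dict String (PySem.Set String)) (x y a b : String) :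
    pvHasEdge (pvAdd1 g x y) a b ↔ pvHasEdge g a b ∨ (a = x ∧ b = y) := by
  unfold pvAdd1 pvHasEdge
  rw [PySem.Dict.getD_insert]
  by_cases hax : a = x
  · subst hax
    simp [PySem.Set.mem_add]
  · simp [hax]

theorem pvMemKeys_add1 (g : PySem.Dict String (PySem.Set String)) (x y a : String) :
    a ∈ (pvAdd1 g x y).keys ↔ a = x ∨ a ∈ g.keys := by
  unfold pvAdd1
  exact PySem.Dict.mem_keys_insert g x a _

theorem pvNodup_add1 (g : PySem.Dict String (PySem.Set String)) (x y : String)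
    (h : g.keys.Nodup) : (pvAdd1 g x y).keys.Nodup := by
  unfold pvAdd1
  exact PySem.Dict.nodup_keys_insert g x _ h

theorem pvHasEdge_addEdge (g : PySem.Dict String (PySem.Set String)) (x y a b : String) :
    pvHasEdge (pvAddEdge g x y) a b ↔ pvHasEdge g a b ∨ (a = x ∧ b = y) ∨ (a = y ∧ b = x) := by
  unfold pvAddEdge
  rw [pvHasEdge_add1, pvHasEdge_add1]
  tauto

theorem pvMemKeys_addEdge (g : PySem.Dict String (PySem.Set String)) (x y a : String) :
    a ∈ (pvAddEdge g x y).keys ↔ a = x ∨ a = y ∨ a ∈ g.keys := by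
  unfold pvAddEdge
  rw [pvMemKeys_add1, pvMemKeys_add1]
  tauto

theorem pvHasEdge_step (g : PySem.Dict String (PySem.Set String)) (p : String × String)
    (a b : String) (h : pvHasEdge g a b) : pvHasEdge (pvStep g p) a b := by
  unfold pvStep
  split
  · exact h
  · exact (pvHasEdge_addEdge g p.1 p.2 a b).mpr (Or.inl h)

theorem pvGood_step (g : PySem.Dict String (PySem.Set String)) (p : String × String)
    (h : pvGood g) : pvGood (pvStep g p) := by
  obtain ⟨hnd, he⟩ := h
  unfold pvStep
  split
  · exact ⟨hnd, he⟩
  · constructor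
    · exact pvNodup_add1 _ _ _ (pvNodup_add1 _ _ _ hnd)
    · intro a b hab
      rcases (pvHasEdge_addEdge g p.1 p.2 a b).mp hab with h0 | ⟨rfl, rfl⟩ | ⟨rfl, rfl⟩
      · obtain ⟨hs, hak, hbk⟩ := he a b h0
        exact ⟨(pvHasEdge_addEdge g p.1 p.2 b a).mpr (Or.inl hs),
          (pvMemKeys_addEdge g p.1 p.2 a).mpr (Or.inr (Or.inr hak)),
          (pvMemKeys_addEdge g p.1 p.2 b).mpr (Or.inr (Or.inr hbk))⟩
      · exact ⟨(pvHasEdge_addEdge g p.1 p.2 p.2 p.1).mpr (Or.inr (Or.inr ⟨rfl, rfl⟩)),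
          (pvMemKeys_addEdge g p.1 p.2 p.1).mpr (Or.inl rfl),
          (pvMemKeys_addEdge g p.1 p.2 p.2).mpr (Or.inr (Or.inl rfl))⟩
      · exact ⟨(pvHasEdge_addEdge g p.1 p.2 p.1 p.2).mpr (Or.inr (Or.inl ⟨rfl, rfl⟩)),
          (pvMemKeys_addEdge g p.1 p.2 p.2).mpr (Or.inr (Or.inl rfl)),
          (pvMemKeys_addEdge g p.1 p.2 p.1).mpr (Or.inl rfl)⟩

theorem pvGood_foldl (l : List (String × String)) (g : PySem.Dict String (PySem.Set String))
    (h : pvGood g) : pvGood (l.foldl pvStep g) := by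
  induction l generalizing g with
  | nil => exact h
  | cons p t ih => exact ih _ (pvGood_step g p h)

theorem pvHasEdge_foldl (l : List (String × String)) (g : PySem.Dict String (PySem.Set String))
    (a b : String) (h : pvHasEdge g a b) : pvHasEdge (l.foldl pvStep g) a b := by
  induction l generalizing g with
  | nil => exact h
  | cons p t ih => exact ih _ (pvHasEdge_step g p a b h)

theorem pvInsert_eq_self (g : PySem.Dict String (PySem.Set String)) (k : String)
    (v : PySem.Set String) (hnd : g.keys.Nodup) (h : g.get? k = some v) : g.insert k v = g := by
  apply PySem.Dict.ext
  have hc : g.contains k = true := by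
    rw [PySem.Dict.contains_eq_isSome_get?, h]; rfl
  rw [PySem.Dict.items_insert_of_contains g v hc]
  have : ∀ p ∈ g.items, (if p.1 == k then (k, v) else p) = p := by
    intro p hp
    by_cases hpk : p.1 == k
    · have hpk' : p.1 = k := by simpa using hpk
      have := PySem.Dict.get?_of_mem_items g hp hnd
      rw [hpk', h] at this
      obtain rfl : v = p.2 := by injection this
      rw [if_pos hpk, ← hpk']
    · rw [if_neg hpk]
  calc (g.items.map fun p => if p.1 == k then (k, v) else p) = g.items.map id := by
        exact List.map_congr_left this
    _ = g.items := List.map_id g.items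

theorem pvAdd1_noop (g : PySem.Dict String (PySem.Set String)) (x y : String)
    (hnd : g.keys.Nodup) (hx : x ∈ g.keys) (he : pvHasEdge g x y) : pvAdd1 g x y = g := by
  have hc : g.contains x = true := (PySem.Dict.contains_iff_mem_keys g x).mpr hx
  obtain ⟨s, hs⟩ : ∃ s, g.get? x = some s := by
    rw [PySem.Dict.contains_eq_isSome_get?] at hc
    exact Option.isSome_iff_exists.mp hc
  have hgd : g.getD x PySem.Set.empty = s := PySem.Dict.getD_of_get?_eq_some g PySem.Set.empty hs
  unfold pvAdd1
  rw [hgd]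
  have hys : y ∈ s := by unfold pvHasEdge at he; rwa [hgd] at he
  rw [PySem.Set.add_of_mem hys]
  exact pvInsert_eq_self g x s hnd hs

theorem pvStep_noop (g : PySem.Dict String (PySem.Set String)) (x y : String)
    (hg : pvGood g) (he : pvHasEdge g x y) : pvStep g (x, y) = g := by
  unfold pvStep
  by_cases hxy : x = y
  · simp [hxy]
  · obtain ⟨hsym, hxk, hyk⟩ := hg.2 x y he
    simp only [if_neg hxy]
    unfold pvAddEdge
    rw [pvAdd1_noop g x y hg.1 hxk he]
    exact pvAdd1_noop g y x hg.1 hyk hsym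

theorem pvFoldlFlat {α β σ : Type} (F : σ → β → σ) (f : α → List β) :
    ∀ (l : List α) (g : σ), l.foldl (fun g a => (f a).foldl F g) g = (l.flatMap f).foldl F g := by
  intro l
  induction l with
  | nil => intro g; rfl
  | cons a t ih => intro g; simp only [List.foldl_cons, List.flatMap_cons, List.foldl_append, ih]

theorem pvCliqueA_eq_pairsA (s : List String) (g : PySem.Dict String (PySem.Set String)) :
    pvCliqueA s g = (s.flatMap (fun x => s.map (fun y => (x, y)))).foldl pvStep g := by
  unfold pvCliqueA
  rw [← pvFoldlFlat pvStep (fun x => s.map (fun y => (x, y))) s g]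
  congr 1
  funext g x
  rw [List.foldl_map]
  rfl

theorem pvAdd1B_eq (g : PySem.Dict String (PySem.Set String)) (x y : String) :
    pvAdd1B g x y = pvAdd1 g x y := by
  unfold pvAdd1B pvAdd1
  by_cases hc : g.contains x = true
  · rw [PySem.Dict.setdefault_of_contains g PySem.Set.empty hc]
  · have hc' : g.contains x = false := by
      cases h : g.contains x
      · rfl
      · exact absurd h hc
    rw [PySem.Dict.setdefault_of_not_contains g PySem.Set.empty hc']
    rw [PySem.Dict.getD_insert g x x PySem.Set.empty PySem.Set.empty, if_pos rfl]
    rw [PySem.Dict.insert_insert_self]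
    rw [PySem.Dict.getD_of_not_contains g PySem.Set.empty hc']

theorem pvStepB_eq (g : PySem.Dict String (PySem.Set String)) (x y : String) :
    (if x = y then g else pvAddEdgeB g x y) = pvStep g (x, y) := by
  unfold pvStep pvAddEdgeB pvAddEdge
  rw [pvAdd1B_eq, pvAdd1B_eq]

theorem pvCliqueB_aux (s : List String) :
    ∀ (t : List String) (k : Nat) (g : PySem.Dict String (PySem.Set String)),
      t = s.drop k →
      (PySem.List.enumerate t (k : Int)).foldl
        (fun g p => (PySem.List.slice s (some (p.1 + 1)) none).foldl
          (fun g y => if p.2 = y then g else pvAddEdgeB g p.2 y) g) g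
      = (pvPairsT t).foldl pvStep g := by
  intro t
  induction t with
  | nil => intro k g ht; rfl
  | cons x r ih =>
    intro k g ht
    rw [PySem.List.enumerate_cons]
    simp only [List.foldl_cons]
    rw [show ((k : Int) + 1) = ((k + 1 : Nat) : Int) from by push_cast; ring]
    have hr : r = s.drop (k + 1) := by
      have h2 := congrArg List.tail ht
      simpa [List.tail_drop] using h2
    have hsl : PySem.List.slice s (some ((k + 1 : Nat) : Int)) none = r := by
      rw [PySem.List.slice_from_natCast, ← hr]
    rw [hsl]
    have hinner : ∀ (g : PySem.Dict String (PySem.Set String)),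
        r.foldl (fun g y => if x = y then g else pvAddEdgeB g x y) g
        = (r.map (fun y => (x, y))).foldl pvStep g := by
      intro g
      rw [List.foldl_map]
      congr 1
      funext g y
      exact pvStepB_eq g x y
    rw [hinner]
    rw [ih (k + 1) _ hr]
    rw [pvPairsT_cons, List.foldl_append]

theorem pvCliqueB_eq_pairsT (s : List String) (g : PySem.Dict String (PySem.Set String)) :
    pvCliqueB s g = (pvPairsT s).foldl pvStep g := by
  unfold pvCliqueB
  exact pvCliqueB_aux s s 0 g rfl

theorem pvEdges_to_x (x : String) :
    ∀ (t : List String) (g : PySem.Dict String (PySem.Set String)) (a : String),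
      a ∈ t → a ≠ x → pvHasEdge ((t.map (fun y => (x, y))).foldl pvStep g) a x := by
  intro t
  induction t with
  | nil => intro g a ha; exact absurd ha (List.not_mem_nil)
  | cons b r ih =>
    intro g a ha hax
    simp only [List.map_cons, List.foldl_cons]
    rcases List.mem_cons.mp ha with rfl | har
    · apply pvHasEdge_foldl
      unfold pvStep
      rw [if_neg (fun h => hax h.symm)]
      exact (pvHasEdge_addEdge g x a a x).mpr (Or.inr (Or.inr ⟨rfl, rfl⟩))
    · exact ih _ a har hax

theorem pvNoopFlat (x : String) :
    ∀ (u : List String) (f : String → List (String × String))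
      (g : PySem.Dict String (PySem.Set String)),
      pvGood g → (∀ a ∈ u, a = x ∨ pvHasEdge g a x) →
      (u.flatMap (fun a => (a, x) :: f a)).foldl pvStep g
      = (u.flatMap f).foldl pvStep g := by
  intro u
  induction u with
  | nil => intro f g _ _; rfl
  | cons a r ih =>
    intro f g hg hu
    simp only [List.flatMap_cons, List.foldl_append, List.foldl_cons]
    have hstep : pvStep g (a, x) = g := by
      rcases hu a (List.mem_cons_self) with rfl | he
      · unfold pvStep; simp
      · exact pvStep_noop g a x hg he
    rw [hstep]
    have : ∀ b ∈ r, b = x ∨ pvHasEdge ((f a).foldl pvStep g) b x := by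
      intro b hb
      rcases hu b (List.mem_cons_of_mem a hb) with rfl | he
      · exact Or.inl rfl
      · exact Or.inr (pvHasEdge_foldl _ _ _ _ he)
    have := ih f ((f a).foldl pvStep g) (pvGood_foldl _ _ hg) this
    simpa [List.foldl_append] using this

theorem pvPairs_reorder :
    ∀ (s : List String) (g : PySem.Dict String (PySem.Set String)), pvGood g →
      (s.flatMap (fun x => s.map (fun y => (x, y)))).foldl pvStep g
      = (pvPairsT s).foldl pvStep g := by
  intro s
  induction s with
  | nil => intro g _; rfl
  | cons x t ih =>
    intro g hg
    have hmapx : (x :: t).map (fun y => (x, y)) = (x, x) :: t.map (fun y => (x, y)) := rfl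
    have hstepxx : pvStep g (x, x) = g := by unfold pvStep; simp
    simp only [List.flatMap_cons, List.foldl_append, hmapx, List.foldl_cons, hstepxx]
    set g1 := (t.map (fun y => (x, y))).foldl pvStep g with hg1
    have hg1good : pvGood g1 := pvGood_foldl _ _ hg
    have hflat : (t.flatMap (fun a => (x :: t).map (fun y => (a, y)))).foldl pvStep g1
        = (t.flatMap (fun a => t.map (fun y => (a, y)))).foldl pvStep g1 := by
      have hfn : (fun a : String => (x :: t).map (fun y => (a, y)))
          = (fun a : String => (a, x) :: t.map (fun y => (a, y))) := by
        funext a; rfl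
      rw [hfn]
      apply pvNoopFlat x t (fun a => t.map (fun y => (a, y))) g1 hg1good
      intro a ha
      by_cases hax : a = x
      · exact Or.inl hax
      · exact Or.inr (pvEdges_to_x x t g a ha hax)
    rw [hflat, ih g1 hg1good]
    rw [pvPairsT_cons, List.foldl_append]

theorem pvGood_empty : pvGood (PySem.Dict.empty : PySem.Dict String (PySem.Set String)) := by
  constructor
  · simp [PySem.Dict.keys_empty]
  · intro x y h
    unfold pvHasEdge at h
    rw [PySem.Dict.getD_empty] at h
    exact absurd h (List.not_mem_nil)

theorem pvClique_eq_and_good (s : List String) (g : PySem.Dict String (PySem.Set String))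
    (hg : pvGood g) : pvCliqueA s g = pvCliqueB s g ∧ pvGood (pvCliqueA s g) := by
  rw [pvCliqueA_eq_pairsA, pvCliqueB_eq_pairsT, pvPairs_reorder s g hg]
  exact ⟨rfl, pvGood_foldl _ _ hg⟩

theorem pvBuild_eq_and_good (list_of_sets : List (List String)) :
    pvBuildGraphA list_of_sets = pvBuildGraphB list_of_sets ∧ pvGood (pvBuildGraphA list_of_sets) := by
  unfold pvBuildGraphA pvBuildGraphB
  have : ∀ (l : List (List String)) (g : PySem.Dict String (PySem.Set String)), pvGood g →
      l.foldl (fun g s => pvCliqueA s g) g = l.foldl (fun g s => pvCliqueB s g) g ∧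
      pvGood (l.foldl (fun g s => pvCliqueA s g) g) := by
    intro l
    induction l with
    | nil => intro g hg; exact ⟨rfl, hg⟩
    | cons s t ih =>
      intro g hg
      obtain ⟨heq, hgood⟩ := pvClique_eq_and_good s g hg
      simp only [List.foldl_cons]
      obtain ⟨ht, hgt⟩ := ih (pvCliqueA s g) hgood
      rw [← heq]
      exact ⟨ht, hgt⟩
  exact this list_of_sets PySem.Dict.empty pvGood_empty


-- ---- Part 2: recursive DFS = stack DFS ----

theorem pvFoldlInv {σ α : Type} (f : σ → α → σ) (P : σ → Prop)
    (h : ∀ s a, P s → P (f s a)) : ∀ (l : List α) (s : σ), P s → P (l.foldl f s) := by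
  intro l
  induction l with
  | nil => intro s hs; exact hs
  | cons a t ih => intro s hs; exact ih _ (h s a hs)

theorem pvDfsA_vis_mono (g : PySem.Dict String (PySem.Set String)) :
    ∀ (fuel : Nat) (n : String) (vis comp : PySem.Set String) (a : String),
      a ∈ vis → a ∈ (pvDfsA g fuel n vis comp).1 := by
  intro fuel
  induction fuel with
  | zero => intro n vis comp a ha; exact ha
  | succ f ih =>
    intro n vis comp a ha
    show a ∈ ((g.getD n PySem.Set.empty).foldl
      (fun p nb => if nb ∈ p.1 then p else pvDfsA g f nb p.1 p.2)
      (PySem.Set.add vis n, PySem.Set.add comp n)).1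
    apply pvFoldlInv _ (fun p : PySem.Set String × PySem.Set String => a ∈ p.1)
    · intro p nb hp
      dsimp only
      split
      · exact hp
      · exact ih nb p.1 p.2 a hp
    · exact (PySem.Set.mem_add vis n a).2 (Or.inl ha)

theorem pvRunStack_nil (g : PySem.Dict String (PySem.Set String)) (vis comp : PySem.Set String) :
    pvRunStack g [] vis comp = (vis, comp) := by
  rw [pvRunStack]

theorem pvRunStack_cons_mem (g : PySem.Dict String (PySem.Set String)) (n : String)
    (st : List String) (vis comp : PySem.Set String) (h : n ∈ vis) :
    pvRunStack g (n :: st) vis comp = pvRunStack g st vis comp := by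
  rw [pvRunStack, dif_pos h]

theorem pvRunStack_cons_not_mem (g : PySem.Dict String (PySem.Set String)) (n : String)
    (st : List String) (vis comp : PySem.Set String) (h : ¬ n ∈ vis) :
    pvRunStack g (n :: st) vis comp
      = pvRunStack g (g.getD n PySem.Set.empty ++ st) (PySem.Set.add vis n) (PySem.Set.add comp n) := by
  rw [pvRunStack, dif_neg h]

theorem pvBridge (g : PySem.Dict String (PySem.Set String)) (hg : pvGood g) :
    ∀ (fuel : Nat) (vis comp : PySem.Set String) (n : String) (st : List String),
      ¬ n ∈ vis → pvUnseen g (PySem.Set.add vis n) < fuel →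
      pvRunStack g (n :: st) vis comp
        = pvRunStack g st (pvDfsA g fuel n vis comp).1 (pvDfsA g fuel n vis comp).2 := by
  intro fuel
  induction fuel with
  | zero => intro vis comp n st hnv hlt; omega
  | succ f ih =>
    intro vis comp n st hnv hlt
    rw [pvRunStack_cons_not_mem g n st vis comp hnv]
    have hdfs : pvDfsA g (f + 1) n vis comp
        = (g.getD n PySem.Set.empty).foldl
            (fun p nb => if nb ∈ p.1 then p else pvDfsA g f nb p.1 p.2)
            (PySem.Set.add vis n, PySem.Set.add comp n) := rfl
    rw [hdfs]
    have hkeys : ∀ m ∈ g.getD n PySem.Set.empty, m ∈ g.keys := fun m hm => (hg.2 n m hm).2.2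
    have hstart : pvUnseen g (PySem.Set.add vis n) ≤ f := by omega
    have loop : ∀ (nbs : List String), (∀ m ∈ nbs, m ∈ g.keys) →
        ∀ (st' : List String) (p : PySem.Set String × PySem.Set String), pvUnseen g p.1 ≤ f →
        pvRunStack g (nbs ++ st') p.1 p.2
          = pvRunStack g st'
              ((nbs.foldl (fun p nb => if nb ∈ p.1 then p else pvDfsA g f nb p.1 p.2) p).1)
              ((nbs.foldl (fun p nb => if nb ∈ p.1 then p else pvDfsA g f nb p.1 p.2) p).2) := by
      intro nbs
      induction nbs with
      | nil => intro _ st' p _; rfl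
      | cons m rest ihr =>
        intro hks st' p hp
        simp only [List.cons_append, List.foldl_cons]
        by_cases hm : m ∈ p.1
        · rw [pvRunStack_cons_mem g m (rest ++ st') p.1 p.2 hm, if_pos hm]
          exact ihr (fun a ha => hks a (List.mem_cons_of_mem m ha)) st' p hp
        · have hmk : m ∈ g.keys := hks m List.mem_cons_self
          have hflt : pvUnseen g (PySem.Set.add p.1 m) < f :=
            Nat.lt_of_lt_of_le (pvUnseen_add_lt g p.1 m hmk hm) hp
          rw [ih p.1 p.2 m (rest ++ st') hm hflt, if_neg hm]
          apply ihr (fun a ha => hks a (List.mem_cons_of_mem m ha)) st'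
          exact Nat.le_trans
            (pvUnseen_mono g p.1 (pvDfsA g f m p.1 p.2).1 (fun a ha => pvDfsA_vis_mono g f m p.1 p.2 a ha))
            hp
    exact loop (g.getD n PySem.Set.empty) hkeys st (PySem.Set.add vis n, PySem.Set.add comp n) hstart

theorem pvUnseen_le_size (g : PySem.Dict String (PySem.Set String)) (vis : PySem.Set String) :
    pvUnseen g vis ≤ g.size := by
  have h1 : pvUnseen g vis ≤ g.keys.length := List.countP_le_length
  have h2 : g.keys.length = g.size := by
    simp [PySem.Dict.keys, PySem.Dict.size]
  omega

-- ===== VERDICT (by name: the statement is the Claim_ definition above) =====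
theorem get_non_overlapping_group_sets_spec : Claim_equal_get_non_overlapping_group_sets := by
  intro l _
  unfold Spec_get_non_overlapping_group_sets
  obtain ⟨heq, hgood⟩ := pvBuild_eq_and_good l
  simp only [get_non_overlapping_group_sets, get_non_overlapping_group_sets_alt, ← heq]
  have hstep : (fun (acc : List (List String) × PySem.Set String) node =>
      if node ∈ acc.2 then acc
      else
        let p := pvDfsA (pvBuildGraphA l) ((pvBuildGraphA l).size + 1) node acc.2 PySem.Set.empty
        (acc.1 ++ [p.2], p.1))
      = (fun (acc : List (List String) × PySem.Set String) start =>
      if start ∈ acc.2 then acc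
      else
        let p := pvRunStack (pvBuildGraphA l) [start] acc.2 PySem.Set.empty
        (acc.1 ++ [p.2], p.1)) := by
    funext acc node
    by_cases hn : node ∈ acc.2
    · simp only [if_pos hn]
    · simp only [if_neg hn]
      have hlt : pvUnseen (pvBuildGraphA l) (PySem.Set.add acc.2 node) < (pvBuildGraphA l).size + 1 :=
        Nat.lt_succ_of_le (pvUnseen_le_size _ _)
      have hb := pvBridge (pvBuildGraphA l) hgood ((pvBuildGraphA l).size + 1) acc.2
        PySem.Set.empty node [] hn hlt
      rw [pvRunStack_nil] at hb
      simp only [hb]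
  rw [hstep]
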